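-- pv_equiv track=rewrite | github.com/WalidGharianiEAGLE/py-cdr | pycdr/cdr.py | _parse_das_content
-- ===== SOURCE A (Python) =====
-- def _parse_das_content(das_content: str, data_id: str):
--     attributes = {}
--     lines = das_content.split('\n')
--     current_attribute = None
--     current_properties = {}
--
--     for line in lines:
--         if not line.strip():
--             continue
--
--         if line.strip().endswith('{'):
--             if current_attribute is not None:
--                 attributes.setdefault(data_id, {})[current_attribute] = current_properties
--             current_attribute = line.strip().split()[0]
--             current_properties = {}
--
--         elif '"' in line:
--             key, value = line.strip().split('"')[0].strip(), line.strip().split('"')[1]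
--             current_properties[key] = value
--
--     if current_attribute is not None:
--         attributes.setdefault(data_id, {})[current_attribute] = current_properties
--
--     return attributes
-- ===== SOURCE B (Python) =====
-- def _parse_das_content(das_content: str, data_id: str):
--     # Pass 1: group the stripped lines into blocks: a new block starts at a line
--     # ending in '{' (name = first whitespace token); property lines (containing
--     # '"') are attached to the latest block; lines before the first block drop.
--     blocks = []
--     for raw in das_content.split('\n'):
--         line = raw.strip()
--         if line.endswith('{'):
--             blocks.append((line.split()[0], []))
--         elif '"' in raw and blocks:
--             blocks[-1][1].append(line)
--     if not blocks:
--         return {}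
--     # Pass 2: parse each block's property lines; assign by name so a duplicate
--     # block name keeps its first position but the last block's properties.
--     result = {}
--     for name, plines in blocks:
--         props = {}
--         for pl in plines:
--             props[pl.split('"')[0].strip()] = pl.split('"')[1]
--         result[name] = props
--     return {data_id: result}
-- ===== Notes on version B (the rewrite author's own statement) =====
-- stated objective: alternative
-- what changed: Replaces A's single stateful pass (current-attribute/current-properties accumulators with flush-on-new-block and a trailing flush) by two phases: first group the lines into (name, property-lines) blocks, then parse each block's lines into its dict and assemble {data_id: {name: props}} only when a block exists.
import Mathlib
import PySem

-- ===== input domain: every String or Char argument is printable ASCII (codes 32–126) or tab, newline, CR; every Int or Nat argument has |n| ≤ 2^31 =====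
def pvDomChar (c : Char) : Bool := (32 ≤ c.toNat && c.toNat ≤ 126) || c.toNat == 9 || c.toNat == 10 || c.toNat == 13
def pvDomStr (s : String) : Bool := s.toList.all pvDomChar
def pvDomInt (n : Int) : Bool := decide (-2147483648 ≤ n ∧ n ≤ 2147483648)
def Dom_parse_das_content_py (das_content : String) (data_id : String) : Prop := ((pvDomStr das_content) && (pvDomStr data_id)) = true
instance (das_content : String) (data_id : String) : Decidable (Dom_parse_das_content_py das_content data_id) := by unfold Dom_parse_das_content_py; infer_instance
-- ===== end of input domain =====

-- B replaces A's single stateful pass (flush-on-new-block accumulators) by a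
-- two-phase decomposition: group lines into (name, property-lines) blocks, then
-- parse each block into its dict; alternative structure, same cost.


-- ===== PORT A =====
-- key, value = line.strip().split('"')[0].strip(), line.strip().split('"')[1]
-- (guarded by '"' in line, so index 1 exists; the defaults are unreachable)
def pvA_kv (st : List Char) : String × String :=
  (String.ofList (PySem.Chars.strip ((PySem.Chars.splitOn st ['"']).headD [])),
   String.ofList ((PySem.Chars.splitOn st ['"']).getD 1 []))

-- attributes.setdefault(data_id, {})[current_attribute] = current_properties :
-- setdefault returns the inner dict (inserting {} if absent) and the in-place
-- update rewrites data_id's value keeping its position — exactly Dict.insert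
-- of the updated inner dict.
def pvA_flush (data_id : String)
    (attrs : PySem.Dict String (PySem.Dict String (PySem.Dict String String)))
    (a : String) (props : PySem.Dict String String) :
    PySem.Dict String (PySem.Dict String (PySem.Dict String String)) :=
  PySem.Dict.insert attrs data_id
    (PySem.Dict.insert (PySem.Dict.getD attrs data_id ⟨[]⟩) a props)

def pvA_step (data_id : String)
    (s : PySem.Dict String (PySem.Dict String (PySem.Dict String String)) ×
         Option String × PySem.Dict String String)
    (line : List Char) :
    PySem.Dict String (PySem.Dict String (PySem.Dict String String)) ×
      Option String × PySem.Dict String String :=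
  let st := PySem.Chars.strip line
  if st = [] then s                                   -- if not line.strip(): continue
  else if PySem.Chars.endswith st ['{'] then
    let attrs' := match s.2.1 with
      | some a => pvA_flush data_id s.1 a s.2.2       -- if current_attribute is not None: flush
      | none => s.1
    (attrs', some (String.ofList ((PySem.Chars.split₀ st).headD [])), ⟨[]⟩)
  else if PySem.Chars.isIn ['"'] line then
    (s.1, s.2.1, PySem.Dict.insert s.2.2 (pvA_kv st).1 (pvA_kv st).2)
  else s

def parse_das_content_py (das_content : String) (data_id : String) :
    List (String × List (String × List (String × String))) :=
  let lines := PySem.Chars.splitOn das_content.toList ['\n']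
  let s := lines.foldl (pvA_step data_id) (⟨[]⟩, none, ⟨[]⟩)
  let attrs := match s.2.1 with
    | some a => pvA_flush data_id s.1 a s.2.2         -- final flush
    | none => s.1
  attrs.items.map (fun p => (p.1, p.2.items.map (fun q => (q.1, q.2.items))))

-- ===== PORT B =====
-- props[pl.split('"')[0].strip()] = pl.split('"')[1]  (same leaf expression as A)
def pvB_kv (st : List Char) : String × String :=
  (String.ofList (PySem.Chars.strip ((PySem.Chars.splitOn st ['"']).headD [])),
   String.ofList ((PySem.Chars.splitOn st ['"']).getD 1 []))

-- pass 1 step; blocks kept in reverse order, each block's property lines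
-- reversed (the standard accumulator rendering of blocks.append /
-- blocks[-1][1].append); reversed back after the fold.
def pvB_group (s : List (String × List (List Char))) (line : List Char) :
    List (String × List (List Char)) :=
  let st := PySem.Chars.strip line
  if PySem.Chars.endswith st ['{'] then
    (String.ofList ((PySem.Chars.split₀ st).headD []), ([] : List (List Char))) :: s
  else if PySem.Chars.isIn ['"'] line then
    match s with
    | [] => []                                        -- 'and blocks' failed: drop
    | (n, ps) :: t => (n, st :: ps) :: t
  else s

def pvB_props (pls : List (List Char)) : PySem.Dict String String :=
  pls.foldl (fun p pl => PySem.Dict.insert p (pvB_kv pl).1 (pvB_kv pl).2) ⟨[]⟩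

def pvB_result (bs : List (String × List (List Char))) :
    PySem.Dict String (PySem.Dict String String) :=
  bs.foldl (fun r b => PySem.Dict.insert r b.1 (pvB_props b.2)) ⟨[]⟩

def parse_das_content_py_alt (das_content : String) (data_id : String) :
    List (String × List (String × List (String × String))) :=
  let rev := (PySem.Chars.splitOn das_content.toList ['\n']).foldl pvB_group []
  let blocks := rev.reverse.map (fun b => (b.1, b.2.reverse))
  if blocks.isEmpty then []
  else [(data_id, (pvB_result blocks).items.map (fun q => (q.1, q.2.items)))]

-- ===== PRECONDITION & SPEC =====
def Spec_parse_das_content_py (das_content : String) (data_id : String) (out : List (String × List (String × List (String × String)))) : Prop := out = parse_das_content_py_alt das_content data_id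
instance (das_content : String) (data_id : String) (out : List (String × List (String × List (String × String)))) : Decidable (Spec_parse_das_content_py das_content data_id out) := by unfold Spec_parse_das_content_py; infer_instance

-- ===== CLAIM (what is proved, stated in full; the proofs are below) =====
def Claim_equal_parse_das_content_py : Prop := ∀ (das_content : String) (data_id : String), Dom_parse_das_content_py das_content data_id → Spec_parse_das_content_py das_content data_id (parse_das_content_py das_content data_id)

-- ===== LEMMAS AND PROOFS =====

-- blocks in forward order, with each block's property lines forward
def pvNorm (rev : List (String × List (List Char))) : List (String × List (List Char)) :=
  rev.reverse.map (fun b => (b.1, b.2.reverse))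

-- what A's attributes dict looks like when the blocks flushed so far are pvNorm t
def pvOuter (data_id : String) (t : List (String × List (List Char))) :
    PySem.Dict String (PySem.Dict String (PySem.Dict String String)) :=
  if t = [] then ⟨[]⟩ else ⟨[(data_id, pvB_result (pvNorm t))]⟩

-- the simulation invariant between A's fold state and B's pass-1 state
def pvInv (data_id : String)
    (s : PySem.Dict String (PySem.Dict String (PySem.Dict String String)) ×
         Option String × PySem.Dict String String)
    (rev : List (String × List (List Char))) : Prop :=
  match rev with
  | [] => s.2.1 = none ∧ s.1 = ⟨[]⟩
  | (n, ps) :: t => s.2.1 = some n ∧ s.2.2 = pvB_props ps.reverse ∧ s.1 = pvOuter data_id t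

lemma pvNorm_cons (n : String) (ps : List (List Char)) (t : List (String × List (List Char))) :
    pvNorm ((n, ps) :: t) = pvNorm t ++ [(n, ps.reverse)] := by
  simp [pvNorm]

lemma pvB_result_append (bs : List (String × List (List Char))) (n : String) (ps : List (List Char)) :
    pvB_result (bs ++ [(n, ps)]) = PySem.Dict.insert (pvB_result bs) n (pvB_props ps) := by
  simp [pvB_result, List.foldl_append]

lemma pvB_props_append (pls : List (List Char)) (pl : List Char) :
    pvB_props (pls ++ [pl]) = PySem.Dict.insert (pvB_props pls) (pvB_kv pl).1 (pvB_kv pl).2 := by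
  simp [pvB_props, List.foldl_append]

lemma pvFlush_eq (data_id n : String) (t : List (String × List (List Char)))
    (props : PySem.Dict String String) :
    pvA_flush data_id (pvOuter data_id t) n props
      = ⟨[(data_id, PySem.Dict.insert (pvB_result (pvNorm t)) n props)]⟩ := by
  unfold pvA_flush pvOuter
  split_ifs with ht
  · subst ht
    simp [pvNorm, pvB_result, PySem.Dict.insert, PySem.Dict.contains,
      PySem.Dict.getD, PySem.Dict.get?]
  · have h1 : PySem.Dict.getD
        (⟨[(data_id, pvB_result (pvNorm t))]⟩ :
          PySem.Dict String (PySem.Dict String (PySem.Dict String String))) data_id ⟨[]⟩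
        = pvB_result (pvNorm t) := by
      simp [PySem.Dict.getD, PySem.Dict.get?]
    rw [h1]
    simp [PySem.Dict.insert, PySem.Dict.contains]

-- strip line = [] means every character of line is whitespace, so '"' is not in line
lemma pvIsIn_false_of_strip_nil (line : List Char)
    (h : PySem.Chars.strip line = []) : PySem.Chars.isIn ['"'] line = false := by
  have hall : ∀ c ∈ line, PySem.Chars.isspace c = true := by
    simp only [PySem.Chars.strip, PySem.Chars.rstrip, PySem.Chars.lstrip,
      List.reverse_eq_nil_iff, List.dropWhile_eq_nil_iff, List.mem_reverse] at h
    intro c hc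
    rw [← List.takeWhile_append_dropWhile (p := PySem.Chars.isspace) (l := line)] at hc
    rcases List.mem_append.mp hc with h1 | h1
    · exact List.mem_takeWhile_imp h1
    · exact h c h1
  rw [PySem.Chars.isIn_eq_false_iff]
  intro hinf
  have hm : ('"' : Char) ∈ line := hinf.subset (List.mem_singleton_self _)
  have := hall _ hm
  simp [PySem.Chars.isspace] at this

lemma pvStep_inv (data_id : String) (line : List Char) (s) (rev)
    (h : pvInv data_id s rev) :
    pvInv data_id (pvA_step data_id s line) (pvB_group rev line) := by
  by_cases hst : PySem.Chars.strip line = []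
  · have hq := pvIsIn_false_of_strip_nil line hst
    have he : PySem.Chars.endswith (PySem.Chars.strip line) ['{'] = false := by
      rw [hst]; decide
    simpa [pvA_step, pvB_group, hst, he, hq] using h
  · by_cases hbr : PySem.Chars.endswith (PySem.Chars.strip line) ['{'] = true
    · match rev with
      | [] =>
        obtain ⟨h1, h2⟩ := h
        simp [pvA_step, pvB_group, hst, hbr, h1, h2, pvInv, pvB_props, pvOuter]
      | (n, ps) :: t =>
        obtain ⟨h1, h2, h3⟩ := h
        simp only [pvA_step, pvB_group, hst, hbr, if_true, h1]
        refine ⟨rfl, rfl, ?_⟩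
        rw [h2, h3, pvFlush_eq]
        simp [pvOuter, pvNorm_cons, pvB_result_append]
    · by_cases hq : PySem.Chars.isIn ['"'] line = true
      · match rev with
        | [] =>
          obtain ⟨h1, h2⟩ := h
          simp [pvA_step, pvB_group, hst, hbr, hq, pvInv, h1, h2]
        | (n, ps) :: t =>
          obtain ⟨h1, h2, h3⟩ := h
          simp only [pvA_step, pvB_group, hst, hbr, hq, if_true, Bool.false_eq_true, if_false, h1]
          refine ⟨rfl, ?_, h3⟩
          rw [h2]
          have : (PySem.Chars.strip line :: ps).reverse = ps.reverse ++ [PySem.Chars.strip line] := by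
            simp
          rw [this, pvB_props_append]
          simp [pvA_kv, pvB_kv]
      · simpa [pvA_step, pvB_group, hst, hbr, hq] using h

lemma pvFold_inv (data_id : String) (lines : List (List Char)) (s) (rev)
    (h : pvInv data_id s rev) :
    pvInv data_id (lines.foldl (pvA_step data_id) s) (lines.foldl pvB_group rev) := by
  induction lines generalizing s rev with
  | nil => exact h
  | cons l ls ih => exact ih _ _ (pvStep_inv data_id l s rev h)

-- ===== VERDICT (by name: the statement is the Claim_ definition above) =====
lemma pvFinal (data_id : String)
    (s : PySem.Dict String (PySem.Dict String (PySem.Dict String String)) ×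
         Option String × PySem.Dict String String)
    (rev : List (String × List (List Char))) (h : pvInv data_id s rev) :
    ((match s.2.1 with
      | some a => pvA_flush data_id s.1 a s.2.2
      | none => s.1 :
        PySem.Dict String (PySem.Dict String (PySem.Dict String String)))).items.map
      (fun p => (p.1, p.2.items.map (fun q => (q.1, q.2.items))))
    = (if (pvNorm rev).isEmpty then []
       else [(data_id, (pvB_result (pvNorm rev)).items.map (fun q => (q.1, q.2.items)))]) := by
  match rev with
  | [] =>
    obtain ⟨h1, h2⟩ := h
    simp [h1, h2, pvNorm]
  | (n, ps) :: t =>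
    obtain ⟨h1, h2, h3⟩ := h
    have hne : (pvNorm ((n, ps) :: t)).isEmpty = false := by
      simp [pvNorm_cons]
    simp only [h1, h2, h3, pvFlush_eq, pvNorm_cons, pvB_result_append]
    simp

theorem parse_das_content_py_spec : Claim_equal_parse_das_content_py := by
  intro das_content data_id _
  unfold Spec_parse_das_content_py parse_das_content_py parse_das_content_py_alt
  have h0 : pvInv data_id (⟨[]⟩, none, ⟨[]⟩) [] := ⟨rfl, rfl⟩
  have hinv := pvFold_inv data_id (PySem.Chars.splitOn das_content.toList ['\n'])
    (⟨[]⟩, none, ⟨[]⟩) [] h0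
  exact pvFinal data_id _ _ hinv
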